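-- pv_equiv track=rewrite | github.com/christofhaerens/advent_of_code | 2016/day02/puzzle02.py | part_2
-- ===== SOURCE A (Python) =====
-- def part_2(data, startpos):
--     #     1
--     #   2 3 4
--     # 5 6 7 8 9
--     #   A B C
--     #     D
--     s = startpos
--     code = ''
--     keypad = {'1': {'U': '1', 'R': '1', 'D': '3', 'L': '1'},
--               '2': {'U': '2', 'R': '3', 'D': '6', 'L': '2'},
--               '3': {'U': '1', 'R': '4', 'D': '7', 'L': '2'},
--               '4': {'U': '4', 'R': '4', 'D': '8', 'L': '3'},
--               '5': {'U': '5', 'R': '6', 'D': '5', 'L': '5'},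
--               '6': {'U': '2', 'R': '7', 'D': 'A', 'L': '5'},
--               '7': {'U': '3', 'R': '8', 'D': 'B', 'L': '6'},
--               '8': {'U': '4', 'R': '9', 'D': 'C', 'L': '7'},
--               '9': {'U': '9', 'R': '9', 'D': '9', 'L': '8'},
--               'A': {'U': '6', 'R': 'B', 'D': 'A', 'L': 'A'},
--               'B': {'U': '7', 'R': 'C', 'D': 'D', 'L': 'A'},
--               'C': {'U': '8', 'R': 'C', 'D': 'C', 'L': 'B'},
--               'D': {'U': 'B', 'R': 'D', 'D': 'D', 'L': 'D'}
--               }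
--     for seq in data:
--         for d in seq:
--             s = keypad[s][d]
--         code += s
--     return code
-- ===== SOURCE B (Python) =====
-- def part_2(data, startpos):
--     # Transition-monoid approach: instead of walking a single key through a 13x4
--     # table, compose, per sequence, the whole keypad's transition map (a 13-char
--     # string telling where EVERY key ends up), memoized per distinct sequence,
--     # and apply it to the current key with str.translate.
--     keys = '123456789ABCD'
--     step = {'U': '121452349678B', 'R': '134467899BCCD',
--             'D': '36785ABC9ADCD', 'L': '122355678AABD'}
--     cache = {}
--
--     def seq_map(seq):
--         if seq not in cache:
--             m = keys
--             for d in seq: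
--                 m = m.translate(str.maketrans(keys, step[d]))
--             cache[seq] = m
--         return cache[seq]
--
--     s = startpos
--     out = []
--     for seq in data:
--         s = s.translate(str.maketrans(keys, seq_map(seq)))
--         out.append(s)
--     return ''.join(out)
-- ===== Notes on version B (the rewrite author's own statement) =====
-- stated objective: alternative
-- what changed: Instead of walking the single current key through A's nested 13x4 transition table, B composes per sequence the whole keypad's transition map (a 13-char string saying where every key ends up, built from four per-direction map strings, memoized per distinct sequence) and applies it to the current key with str.translate.
import Mathlib
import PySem

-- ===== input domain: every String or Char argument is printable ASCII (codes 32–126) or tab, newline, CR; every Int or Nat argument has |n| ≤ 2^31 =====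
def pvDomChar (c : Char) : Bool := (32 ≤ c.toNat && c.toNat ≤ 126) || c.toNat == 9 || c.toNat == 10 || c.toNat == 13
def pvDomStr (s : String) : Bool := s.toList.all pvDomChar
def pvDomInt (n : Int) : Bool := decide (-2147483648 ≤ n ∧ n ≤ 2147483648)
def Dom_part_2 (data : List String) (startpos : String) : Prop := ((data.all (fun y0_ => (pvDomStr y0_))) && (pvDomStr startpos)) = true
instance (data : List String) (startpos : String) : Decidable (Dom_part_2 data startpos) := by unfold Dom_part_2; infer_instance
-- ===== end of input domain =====

-- B replaces A's single-key walk through a 13x4 transition table by composing, per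
-- sequence, the whole keypad's transition map (a 13-char string, memoized per distinct
-- sequence) applied via a translate table; objective: alternative.


-- ===== PORT A =====
def keypadA : PySem.Dict String (PySem.Dict String String) :=
  PySem.Dict.ofList
    [ ("1", PySem.Dict.ofList [("U","1"),("R","1"),("D","3"),("L","1")])
    , ("2", PySem.Dict.ofList [("U","2"),("R","3"),("D","6"),("L","2")])
    , ("3", PySem.Dict.ofList [("U","1"),("R","4"),("D","7"),("L","2")])
    , ("4", PySem.Dict.ofList [("U","4"),("R","4"),("D","8"),("L","3")])
    , ("5", PySem.Dict.ofList [("U","5"),("R","6"),("D","5"),("L","5")])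
    , ("6", PySem.Dict.ofList [("U","2"),("R","7"),("D","A"),("L","5")])
    , ("7", PySem.Dict.ofList [("U","3"),("R","8"),("D","B"),("L","6")])
    , ("8", PySem.Dict.ofList [("U","4"),("R","9"),("D","C"),("L","7")])
    , ("9", PySem.Dict.ofList [("U","9"),("R","9"),("D","9"),("L","8")])
    , ("A", PySem.Dict.ofList [("U","6"),("R","B"),("D","A"),("L","A")])
    , ("B", PySem.Dict.ofList [("U","7"),("R","C"),("D","D"),("L","A")])
    , ("C", PySem.Dict.ofList [("U","8"),("R","C"),("D","C"),("L","B")])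
    , ("D", PySem.Dict.ofList [("U","B"),("R","D"),("D","D"),("L","D")]) ]

-- keypad[s][d]; the ".getD" defaults are only reached where Python raises KeyError (outside Pre_)
def stepA (s : String) (c : Char) : String :=
  (((keypadA.get? s).getD PySem.Dict.empty).get? (String.singleton c)).getD "?"

-- one outer-loop iteration of A: walk one sequence, then code += s
def goA (st : String × String) (seq : String) : String × String :=
  (seq.toList.foldl stepA st.1, st.2 ++ seq.toList.foldl stepA st.1)

def part_2 (data : List String) (startpos : String) : String :=
  (data.foldl goA (startpos, "")).2

-- ===== PORT B =====
def keysB : String := "123456789ABCD"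

-- per-direction transition of EVERY key at once (i-th char = where the i-th key moves)
def stepB : PySem.Dict Char String :=
  PySem.Dict.ofList
    [ ('U', "121452349678B"), ('R', "134467899BCCD")
    , ('D', "36785ABC9ADCD"), ('L', "122355678AABD") ]

-- str.maketrans(ks, m): the char-to-char table (exact for two equal-length ASCII strings)
def pyMaketrans (ks m : String) : PySem.Dict Char Char :=
  PySem.Dict.ofList (ks.toList.zip m.toList)

-- s.translate(tbl): map each char through the table, unmapped chars unchanged (exact)
def pyTranslate (s : String) (tbl : PySem.Dict Char Char) : String :=
  String.ofList (s.toList.map (fun c => (tbl.get? c).getD c))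

-- seq_map with the cache: memoized composition of the sequence's whole-keypad map;
-- the ".getD" default is only reached where Python raises KeyError (outside Pre_)
def seqMapB (cache : PySem.Dict String String) (seq : String) :
    String × PySem.Dict String String :=
  match cache.get? seq with
  | some m => (m, cache)
  | none =>
    let m := seq.toList.foldl
      (fun m d => pyTranslate m (pyMaketrans keysB ((stepB.get? d).getD ""))) keysB
    (m, cache.insert seq m)

-- one outer-loop iteration of B: translate the current key through the sequence's map
def goB (st : String × List String × PySem.Dict String String) (seq : String) :
    String × List String × PySem.Dict String String :=
  let r := seqMapB st.2.2 seq
  let s := pyTranslate st.1 (pyMaketrans keysB r.1)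
  (s, st.2.1 ++ [s], r.2)

def part_2_alt (data : List String) (startpos : String) : String :=
  PySem.Str.join "" ((data.foldl goB (startpos, [], PySem.Dict.empty)).2.1)

-- ===== PRECONDITION & SPEC =====
-- Pre_ excludes exactly the inputs where A raises KeyError: a direction character other
-- than U/D/L/R, or a start position that is not one of the 13 keys while some sequence
-- is nonempty (with all sequences empty no lookup happens and A returns normally).
def keyList : List String := ["1","2","3","4","5","6","7","8","9","A","B","C","D"]

def Pre_part_2 (data : List String) (startpos : String) : Prop :=
  (data.all (fun seq => seq.toList.all (fun c => (['U', 'D', 'L', 'R'] : List Char).contains c))) = true ∧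
    (startpos ∈ keyList ∨ (data.all (fun seq => seq.toList.isEmpty)) = true)
instance (data : List String) (startpos : String) : Decidable (Pre_part_2 data startpos) := by
  unfold Pre_part_2; infer_instance

def pvWitness_part_2 : List String × String := (["ULL", "RRDDD", "LURDL", "UUUUD"], "5")

def Spec_part_2 (data : List String) (startpos : String) (out : String) : Prop := out = part_2_alt data startpos
instance (data : List String) (startpos : String) (out : String) : Decidable (Spec_part_2 data startpos out) := by unfold Spec_part_2; infer_instance

-- ===== CLAIM (what is proved, stated in full; the proofs are below) =====
def Claim_equal_part_2 : Prop := ∀ (data : List String) (startpos : String), Dom_part_2 data startpos → Pre_part_2 data startpos → Spec_part_2 data startpos (part_2 data startpos)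

-- ===== LEMMAS AND PROOFS =====

def keyChars : List Char := ['1','2','3','4','5','6','7','8','9','A','B','C','D']

lemma keysB_toList : keysB.toList = keyChars := by decide

-- the composed whole-keypad map of one sequence (what seq_map computes)
def cmpSeq (seq : String) : String :=
  seq.toList.foldl
    (fun m d => pyTranslate m (pyMaketrans keysB ((stepB.get? d).getD ""))) keysB

-- the character-level translate table lookup
def chTr (m : String) (c : Char) : Char := ((pyMaketrans keysB m).get? c).getD c

-- the character-level fold of one key through a sequence
def chFold (c : Char) (ds : List Char) : Char :=
  ds.foldl (fun c d => chTr ((stepB.get? d).getD "") c) c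

lemma seqMapB_fst (cache : PySem.Dict String String) (seq : String)
    (hinv : ∀ q m, cache.get? q = some m → m = cmpSeq q) :
    (seqMapB cache seq).1 = cmpSeq seq ∧
      (∀ q m, (seqMapB cache seq).2.get? q = some m → m = cmpSeq q) := by
  unfold seqMapB
  cases h : cache.get? seq with
  | some m => exact ⟨(hinv seq m h).symm ▸ rfl, by simpa [h] using hinv⟩
  | none =>
    refine ⟨rfl, ?_⟩
    intro q m hq
    simp only at hq
    rw [PySem.Dict.get?_insert] at hq
    split_ifs at hq with he
    · cases hq; exact he ▸ rfl
    · exact hinv q m hq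

-- one translate pass is a map over the characters
lemma toList_pyTranslate (s : String) (tbl : PySem.Dict Char Char) :
    (pyTranslate s tbl).toList = s.toList.map (fun c => (tbl.get? c).getD c) := by
  simp [pyTranslate]

-- fold of char-wise maps = map of char-wise folds
lemma cmpFrom_toList (ds : List Char) : ∀ m : String,
    (ds.foldl (fun m d => pyTranslate m (pyMaketrans keysB ((stepB.get? d).getD ""))) m).toList
      = m.toList.map (fun c => chFold c ds) := by
  induction ds with
  | nil => intro m; simp [chFold]
  | cons d ds ih =>
    intro m
    simp only [List.foldl_cons, ih, toList_pyTranslate, List.map_map]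
    simp [chFold, chTr, Function.comp_def]
  
lemma cmpSeq_toList (seq : String) :
    (cmpSeq seq).toList = keyChars.map (fun c => chFold c seq.toList) := by
  unfold cmpSeq; rw [cmpFrom_toList, keysB_toList]

-- looking a key char up in the table built from (keys, keys.map f) gives f of it
lemma chTr_map (f : Char → Char) : ∀ c ∈ keyChars,
    ((pyMaketrans keysB (String.ofList (keyChars.map f))).get? c).getD c = f c := by
  intro c hc
  simp only [pyMaketrans, keysB_toList, String.toList_ofList]
  fin_cases hc <;>
    simp [keyChars, PySem.Dict.ofList, PySem.Dict.update, PySem.Dict.get?_insert]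

-- 52-case check: one char-level step equals one A-table step, and keys are preserved
set_option maxRecDepth 4000 in
lemma step_agree : ∀ c ∈ keyChars, ∀ d ∈ (['U', 'D', 'L', 'R'] : List Char),
    String.singleton (chTr ((stepB.get? d).getD "") c) = stepA (String.singleton c) d ∧
      chTr ((stepB.get? d).getD "") c ∈ keyChars := by
  intro c hc d hd
  fin_cases hc <;> fin_cases hd <;> exact ⟨rfl, by decide⟩

lemma chFold_agree (ds : List Char) : ∀ c ∈ keyChars,
    (∀ d ∈ ds, d ∈ (['U', 'D', 'L', 'R'] : List Char)) →
    String.singleton (chFold c ds) = ds.foldl stepA (String.singleton c) ∧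
      chFold c ds ∈ keyChars := by
  induction ds with
  | nil => intro c hc _; exact ⟨rfl, hc⟩
  | cons d ds ih =>
    intro c hc hall
    obtain ⟨h1, h2⟩ := step_agree c hc d (hall d (List.mem_cons_self ..))
    have := ih _ h2 (fun d' hd' => hall d' (List.mem_cons_of_mem _ hd'))
    simpa [chFold, List.foldl_cons, ← h1] using this

lemma str_ext_toList (s t : String) (h : s.toList = t.toList) : s = t :=
  String.ext (by simpa [String.toList] using h)

set_option maxRecDepth 4000 in
lemma keyList_eq : keyList = keyChars.map String.singleton := by rfl

lemma keyList_char : ∀ s ∈ keyList, ∃ c ∈ keyChars, s = String.singleton c := by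
  intro s hs
  rw [keyList_eq] at hs
  obtain ⟨c, hc, rfl⟩ := List.mem_map.mp hs
  exact ⟨c, hc, rfl⟩

lemma singleton_mem_keyList : ∀ c ∈ keyChars, String.singleton c ∈ keyList := by
  intro c hc
  rw [keyList_eq]
  exact List.mem_map_of_mem hc

-- the outer translate on a key through a sequence's composed map = A's inner walk
lemma outer_step (s : String) (hs : s ∈ keyList) (seq : String)
    (hall : ∀ c ∈ seq.toList, c ∈ (['U', 'D', 'L', 'R'] : List Char)) :
    pyTranslate s (pyMaketrans keysB (cmpSeq seq)) = seq.toList.foldl stepA s ∧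
      seq.toList.foldl stepA s ∈ keyList := by
  obtain ⟨c, hc, rfl⟩ := keyList_char s hs
  obtain ⟨h1, h2⟩ := chFold_agree seq.toList c hc hall
  have htbl : cmpSeq seq = String.ofList (keyChars.map (fun c => chFold c seq.toList)) := by
    have := congrArg String.ofList (cmpSeq_toList seq)
    simpa using this
  constructor
  · rw [← h1, htbl]
    unfold pyTranslate
    refine str_ext_toList _ _ ?_
    simp only [String.toList_singleton, String.toList_ofList, List.map_cons, List.map_nil]
    rw [chTr_map (fun c => chFold c seq.toList) c hc]
  · rw [← h1]; exact singleton_mem_keyList _ h2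

-- the identity map: translating any string through (keys, keys) changes nothing
lemma translate_id (s : String) : pyTranslate s (pyMaketrans keysB keysB) = s := by
  have hch : ∀ c : Char, ((pyMaketrans keysB keysB).get? c).getD c = c := by
    intro c
    by_cases hc : c ∈ keyChars
    · have h := chTr_map id c hc
      simpa [keysB_toList] using h
    · have hnone : (pyMaketrans keysB keysB).get? c = none := by
        rw [PySem.Dict.get?_eq_none_iff_not_mem_keys]
        intro hmem
        refine hc ?_
        have hk : (pyMaketrans keysB keysB).keys = keyChars := by decide
        rwa [hk] at hmem
      simp [hnone]
  unfold pyTranslate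
  have hmap : s.toList.map (fun c => ((pyMaketrans keysB keysB).get? c).getD c) = s.toList := by
    simp [hch]
  rw [hmap, String.ofList_toList]

-- B's list accumulator factors out of the fold
lemma outer_acc (data : List String) : ∀ s L cache,
    data.foldl goB (s, L, cache)
      = ((data.foldl goB (s, [], cache)).1,
         L ++ (data.foldl goB (s, [], cache)).2.1,
         (data.foldl goB (s, [], cache)).2.2) := by
  induction data with
  | nil => intro s L cache; simp
  | cons seq rest ih =>
    intro s L cache
    simp only [List.foldl_cons, goB, List.nil_append]
    rw [ih, ih (pyTranslate s (pyMaketrans keysB (seqMapB cache seq).1))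
          [pyTranslate s (pyMaketrans keysB (seqMapB cache seq).1)]]
    simp

lemma join_nil_cons (a : List Char) (l : List (List Char)) :
    PySem.Chars.join [] (a :: l) = a ++ PySem.Chars.join [] l := by
  cases l <;> simp [PySem.Chars.join_cons_cons]

lemma outer_agree (data : List String) : ∀ s code cache,
    (∀ q m, cache.get? q = some m → m = cmpSeq q) →
    (∀ seq ∈ data, ∀ c ∈ seq.toList, c ∈ (['U', 'D', 'L', 'R'] : List Char)) →
    (s ∈ keyList ∨ ∀ seq ∈ data, seq.toList = []) →
    ((data.foldl goA (s, code)).2).toList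
    = code.toList ++ PySem.Chars.join []
        (((data.foldl goB (s, [], cache)).2.1).map String.toList) := by
  induction data with
  | nil => intro s code cache _ _ _; simp [PySem.Chars.join_nil]
  | cons seq rest ih =>
    intro s code cache hinv hall hkey
    obtain ⟨hfst, hinv'⟩ := seqMapB_fst cache seq hinv
    have hstep : pyTranslate s (pyMaketrans keysB (cmpSeq seq)) = seq.toList.foldl stepA s ∧
        (seq.toList.foldl stepA s ∈ keyList ∨ ∀ q ∈ rest, q.toList = []) := by
      rcases hkey with hs | hemp
      · obtain ⟨h1, h2⟩ := outer_step s hs seq (hall seq (List.mem_cons_self ..))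
        exact ⟨h1, Or.inl h2⟩
      · have hse : seq.toList = [] := hemp seq (List.mem_cons_self ..)
        have hcm : cmpSeq seq = keysB := by unfold cmpSeq; rw [hse]; rfl
        rw [hcm, hse]
        exact ⟨translate_id s, Or.inr (fun q hq => hemp q (List.mem_cons_of_mem _ hq))⟩
    obtain ⟨h1, h2⟩ := hstep
    simp only [List.foldl_cons, goA, goB, List.nil_append, hfst, h1]
    rw [outer_acc rest (seq.toList.foldl stepA s) [seq.toList.foldl stepA s] (seqMapB cache seq).2]
    simp only [List.map_cons, List.singleton_append, join_nil_cons]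
    rw [ih (seq.toList.foldl stepA s) (code ++ seq.toList.foldl stepA s) (seqMapB cache seq).2
          hinv' (fun q hq => hall q (List.mem_cons_of_mem _ hq)) h2]
    simp

-- ===== VERDICT (by name: the statement is the Claim_ definition above) =====
theorem part_2_spec : Claim_equal_part_2 := by
  intro data startpos _ hpre
  obtain ⟨hallb, hkeyb⟩ := hpre
  have hall : ∀ seq ∈ data, ∀ c ∈ seq.toList, c ∈ (['U', 'D', 'L', 'R'] : List Char) := by
    simpa [List.all_eq_true] using hallb
  have hkey : startpos ∈ keyList ∨ ∀ seq ∈ data, seq.toList = [] := by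
    rcases hkeyb with hs | hemp
    · exact Or.inl hs
    · refine Or.inr ?_
      intro seq hseq
      have := (List.all_eq_true.mp hemp) seq hseq
      simpa [List.isEmpty_iff] using this
  unfold Spec_part_2
  have h := outer_agree data startpos "" PySem.Dict.empty
    (by intro q m hq; simp [PySem.Dict.get?_empty] at hq) hall hkey
  have hlist : (part_2 data startpos).toList = (part_2_alt data startpos).toList := by
    unfold part_2 part_2_alt
    rw [PySem.Str.toList_join]
    simpa using h
  exact str_ext_toList _ _ hlist
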